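-- pv_equiv track=rewrite | github.com/Nazia-naz90/Q4-hackathon-2-phase-4-main | test_update_fix.py | simulate_update_detection
-- ===== SOURCE A (Python) =====
-- def simulate_update_detection(user_message):
--     """
--     Simulate the update detection logic that was added to the process_message function.
--     """
--     user_message_lower = user_message.lower().strip()
--
--     # Check for update keywords
--     update_keywords = ["update", "change", "modify", "adjust", "set", "make", "turn", "switch", "alter", "revise", "upgrade", "improve", "enhance"]
--     has_update_keyword = any(keyword in user_message_lower for keyword in update_keywords)
--
--     # Look for patterns like "update X to Y" or "change X to Y"
--     update_pattern_detected = False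
--     if has_update_keyword:
--         parts = user_message.split()
--         if len(parts) >= 4:  # Need at least "update X to Y"
--             for i, part in enumerate(parts):
--                 if part.lower() in ["update", "change", "modify", "adjust", "set", "make", "turn", "switch"]:
--                     # Look for "to" somewhere after the update keyword
--                     for j in range(i + 1, min(len(parts), i + 5)):  # Check next 4 words
--                         if parts[j].lower() == "to":
--                             update_pattern_detected = True
--                             break
--
--     # Additional specific check for the problematic example
--     if "update" in user_message_lower and "to" in user_message_lower:
--         update_words = ["high", "medium", "low", "priority", "completed", "pending", "today", "tomorrow", "date", "due"]
--         if any(word in user_message_lower for word in update_words):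
--             update_pattern_detected = True
--
--     return update_pattern_detected
-- ===== SOURCE B (Python) =====
-- def simulate_update_detection(user_message):
--     """Single forward pass over the tokens (last-trigger index) instead of the
--     nested look-ahead loops of the original."""
--     lowered = user_message.lower().strip()
--
--     keywords = ("update", "change", "modify", "adjust", "set", "make", "turn",
--                 "switch", "alter", "revise", "upgrade", "improve", "enhance")
--     detected = False
--     if any(k in lowered for k in keywords):
--         parts = user_message.split()
--         if len(parts) >= 4:
--             triggers = {"update", "change", "modify", "adjust", "set", "make", "turn", "switch"}
--             last = None
--             for idx, word in enumerate(parts):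
--                 w = word.lower()
--                 if w == "to" and last is not None and idx - last <= 4:
--                     detected = True
--                 if w in triggers:
--                     last = idx
--
--     if "update" in lowered and "to" in lowered:
--         if any(w in lowered for w in ("high", "medium", "low", "priority", "completed",
--                                       "pending", "today", "tomorrow", "date", "due")):
--             detected = True
--
--     return detected
-- ===== Notes on version B (the rewrite author's own statement) =====
-- stated objective: alternative
-- what changed: The nested look-ahead loops (for each trigger token, scan the next four tokens for the separator) are replaced by a single forward pass that maintains the index of the most recent trigger token and flags the pattern when the separator token appears at most four positions after it.
import Mathlib
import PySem

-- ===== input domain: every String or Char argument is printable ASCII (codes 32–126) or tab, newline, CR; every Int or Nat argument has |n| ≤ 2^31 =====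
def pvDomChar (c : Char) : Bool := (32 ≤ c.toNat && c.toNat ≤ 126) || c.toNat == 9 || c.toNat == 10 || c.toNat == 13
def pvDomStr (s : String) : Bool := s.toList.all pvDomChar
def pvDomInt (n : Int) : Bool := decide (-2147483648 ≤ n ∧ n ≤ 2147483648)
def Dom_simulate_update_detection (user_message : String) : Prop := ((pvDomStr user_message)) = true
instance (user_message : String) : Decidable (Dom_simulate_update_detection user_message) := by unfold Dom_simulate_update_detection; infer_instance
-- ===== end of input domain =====

-- B replaces A's nested look-ahead loops (scan the next four tokens after each trigger for "to")
-- by a single forward pass tracking the most recent trigger index; return values are proved equal.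

-- shared literal word lists (appear verbatim in both Python versions)
def pvUpdateKeywords : List String :=
  ["update", "change", "modify", "adjust", "set", "make", "turn", "switch",
   "alter", "revise", "upgrade", "improve", "enhance"]
def pvTriggers : List String :=
  ["update", "change", "modify", "adjust", "set", "make", "turn", "switch"]
def pvUpdateWords : List String :=
  ["high", "medium", "low", "priority", "completed", "pending", "today",
   "tomorrow", "date", "due"]

-- ===== PORT A =====
-- A's nested loops: for each token, if it is a trigger, scan the next four tokens for "to"
-- (the inner `break` only sets the sticky flag, so it is `List.any` over the window).
def pvLoopA (parts : List String) : Bool :=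
  (PySem.List.enumerate parts).foldl
    (fun acc ip =>
      if pvTriggers.contains (PySem.Str.lower ip.2) then
        if (PySem.List.pyRange (ip.1 + 1) (min (parts.length : Int) (ip.1 + 5))).any
             (fun j => PySem.Str.lower (PySem.List.pyGetD parts j "") == "to")
        then true else acc
      else acc)
    false

def simulate_update_detection (user_message : String) : Bool :=
  let user_message_lower := PySem.Str.strip (PySem.Str.lower user_message)
  let has_update_keyword := pvUpdateKeywords.any (fun k => PySem.Str.isIn k user_message_lower)
  let update_pattern_detected :=
    if has_update_keyword then
      let parts := PySem.Str.split₀ user_message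
      if 4 ≤ parts.length then pvLoopA parts else false
    else false
  if PySem.Str.isIn "update" user_message_lower && PySem.Str.isIn "to" user_message_lower then
    if pvUpdateWords.any (fun w => PySem.Str.isIn w user_message_lower) then true
    else update_pattern_detected
  else update_pattern_detected

-- ===== PORT B =====
-- `last is not None and idx - last <= 4`
def pvNear : Option Int → Int → Bool
  | some t, idx => decide (idx - t ≤ 4)
  | none, _ => false

-- B's single pass: state = (detected, index of most recent trigger token)
def pvLoopB (parts : List String) : Bool :=
  ((PySem.List.enumerate parts).foldl
    (fun st ip =>
      let w := PySem.Str.lower ip.2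
      let det := if (w == "to") && pvNear st.2 ip.1 then true else st.1
      let last := if pvTriggers.contains w then some ip.1 else st.2
      (det, last))
    ((false, none) : Bool × Option Int)).1

def simulate_update_detection_alt (user_message : String) : Bool :=
  let lowered := PySem.Str.strip (PySem.Str.lower user_message)
  let detected :=
    if pvUpdateKeywords.any (fun k => PySem.Str.isIn k lowered) then
      let parts := PySem.Str.split₀ user_message
      if 4 ≤ parts.length then pvLoopB parts else false
    else false
  if PySem.Str.isIn "update" lowered && PySem.Str.isIn "to" lowered then
    if pvUpdateWords.any (fun w => PySem.Str.isIn w lowered) then true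
    else detected
  else detected

-- ===== PRECONDITION & SPEC =====
def Spec_simulate_update_detection (user_message : String) (out : Bool) : Prop := out = simulate_update_detection_alt user_message
instance (user_message : String) (out : Bool) : Decidable (Spec_simulate_update_detection user_message out) := by unfold Spec_simulate_update_detection; infer_instance

-- ===== CLAIM (what is proved, stated in full; the proofs are below) =====
def Claim_equal_simulate_update_detection : Prop := ∀ (user_message : String), Dom_simulate_update_detection user_message → Spec_simulate_update_detection user_message (simulate_update_detection user_message)

-- ===== LEMMAS AND PROOFS =====

-- the common specification both loops decide: some token j is "to" and some trigger token i
-- lies at most four positions before it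
def pvSpec (parts : List String) : Prop :=
  ∃ j, j < parts.length ∧ (PySem.Str.lower (parts.getD j "") == "to") = true ∧
    ∃ i, i < j ∧ (pvTriggers.contains (PySem.Str.lower (parts.getD i ""))) = true ∧ (j : Int) ≤ (i : Int) + 4

lemma pvLoopA_any (l : List (Int × String)) (f g : Int × String → Bool) (b : Bool) :
    l.foldl (fun acc ip => if f ip then (if g ip then true else acc) else acc) b
      = (b || l.any fun ip => f ip && g ip) := by
  induction l generalizing b with
  | nil => simp
  | cons x xs ih =>
      simp only [List.foldl_cons, List.any_cons, ih]
      cases hf : f x <;> cases hg : g x <;> simp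

lemma pvLoopA_iff (parts : List String) : pvLoopA parts = true ↔ pvSpec parts := by
  rw [pvLoopA, pvLoopA_any]
  simp only [Bool.false_or, List.any_eq_true, PySem.List.mem_enumerate_iff]
  constructor
  · rintro ⟨ip, ⟨k, hk, rfl⟩, hcond⟩
    simp only [Bool.and_eq_true, List.any_eq_true] at hcond
    obtain ⟨htrig, jz, hjz, hto⟩ := hcond
    rw [PySem.List.mem_pyRange_one] at hjz
    have h0 : (0:Int) ≤ jz := by omega
    have hjlt : jz < (parts.length : Int) := by omega
    refine ⟨jz.toNat, by omega, ?_, k, by omega, ?_, by omega⟩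
    · rwa [PySem.List.pyGetD_of_nonneg _ _ h0] at hto
    · rwa [List.getD_eq_getElem _ _ hk]
  · rintro ⟨j, hj, hto, i, hij, htrig, hle⟩
    refine ⟨((i : Int), parts[i]'(by omega)), ⟨i, by omega, by simp⟩, ?_⟩
    simp only [Bool.and_eq_true, List.any_eq_true]
    refine ⟨by rwa [List.getD_eq_getElem _ _ (by omega : i < parts.length)] at htrig,
      (j : Int), ?_, ?_⟩
    · rw [PySem.List.mem_pyRange_one]; omega
    · rw [PySem.List.pyGetD_of_nonneg _ _ (by omega : (0:Int) ≤ (j:Int))]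
      simpa using hto

-- B's pass, unrolled recursively
def pvSpecFrom : List String → Int → Option Int → Prop
  | [], _, _ => False
  | x :: ps, s, last =>
      ((PySem.Str.lower x == "to") = true ∧ pvNear last s = true)
      ∨ pvSpecFrom ps (s + 1) (if pvTriggers.contains (PySem.Str.lower x) then some s else last)

lemma pvLoopB_fold (ps : List String) : ∀ (s : Int) (det : Bool) (last : Option Int),
    ((PySem.List.enumerate ps s).foldl
      (fun st ip =>
        let w := PySem.Str.lower ip.2
        let det := if (w == "to") && pvNear st.2 ip.1 then true else st.1
        let last := if pvTriggers.contains w then some ip.1 else st.2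
        (det, last))
      (det, last)).1 = true
    ↔ (det = true ∨ pvSpecFrom ps s last) := by
  induction ps with
  | nil => intro s det last; simp [pvSpecFrom, PySem.List.enumerate_nil]
  | cons x xs ih =>
      intro s det last
      rw [PySem.List.enumerate_cons, List.foldl_cons]
      simp only []
      rw [ih]
      simp only [pvSpecFrom]
      by_cases hc : ((PySem.Str.lower x == "to") && pvNear last s) = true
      · simp only [hc, if_pos]
        simp only [Bool.and_eq_true] at hc
        tauto
      · rw [if_neg hc]
        simp only [Bool.and_eq_true] at hc
        constructor
        · rintro (h | h)
          · exact Or.inl h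
          · exact Or.inr (Or.inr h)
        · rintro (h | ⟨h1, h2⟩ | h)
          · exact Or.inl h
          · exact absurd ⟨h1, h2⟩ hc
          · exact Or.inr h

lemma pvNear_iff (last : Option Int) (idx : Int) :
    pvNear last idx = true ↔ ∃ t, last = some t ∧ idx ≤ t + 4 := by
  cases last with
  | none => simp [pvNear]
  | some t => simp [pvNear]; omega

lemma pvSpecFrom_iff (ps : List String) : ∀ (s : Int) (last : Option Int),
    (∀ t, last = some t → t < s) →
    (pvSpecFrom ps s last ↔
      ∃ j, j < ps.length ∧ (PySem.Str.lower (ps.getD j "") == "to") = true ∧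
        ((∃ t, last = some t ∧ s + (j : Int) ≤ t + 4)
          ∨ ∃ i, i < j ∧ (pvTriggers.contains (PySem.Str.lower (ps.getD i ""))) = true
              ∧ (j : Int) ≤ (i : Int) + 4)) := by
  induction ps with
  | nil => intro s last _; simp [pvSpecFrom]
  | cons x xs ih =>
      intro s last hlast
      simp only [pvSpecFrom]
      have hlast' : ∀ t, (if pvTriggers.contains (PySem.Str.lower x) then some s else last) = some t → t < s + 1 := by
        intro t ht
        by_cases hx : pvTriggers.contains (PySem.Str.lower x) = true
        · rw [if_pos hx] at ht; injection ht with h; omega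
        · rw [if_neg hx] at ht; have := hlast t ht; omega
      rw [ih (s + 1) _ hlast', pvNear_iff]
      constructor
      · rintro (⟨hto, t, hlt, hle⟩ | ⟨k, hk, hto, hrest⟩)
        · exact ⟨0, by simp, by simpa using hto, Or.inl ⟨t, hlt, by push_cast; omega⟩⟩
        · refine ⟨k + 1, by simp only [List.length_cons]; omega, by simpa using hto, ?_⟩
          rcases hrest with ⟨t, hsome, hle⟩ | ⟨m, hmk, htrig, hle⟩
          · by_cases hx : pvTriggers.contains (PySem.Str.lower x) = true
            · rw [if_pos hx] at hsome
              injection hsome with h; subst h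
              exact Or.inr ⟨0, by omega, by simpa using hx, by push_cast at hle ⊢; omega⟩
            · rw [if_neg hx] at hsome
              exact Or.inl ⟨t, hsome, by push_cast at hle ⊢; omega⟩
          · exact Or.inr ⟨m + 1, by omega, by simpa using htrig, by push_cast at hle ⊢; omega⟩
      · rintro ⟨j, hj, hto, hrest⟩
        cases j with
        | zero =>
            rcases hrest with ⟨t, hsome, hle⟩ | ⟨i, hi, _⟩
            · exact Or.inl ⟨by simpa using hto, t, hsome, by push_cast at hle; omega⟩
            · omega
        | succ k =>
            simp only [List.length_cons] at hj
            refine Or.inr ⟨k, by omega, by simpa using hto, ?_⟩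
            rcases hrest with ⟨t, hsome, hle⟩ | ⟨i, hi, htrig, hle⟩
            · have htlt := hlast t hsome
              by_cases hx : pvTriggers.contains (PySem.Str.lower x) = true
              · exact Or.inl ⟨s, by rw [if_pos hx], by push_cast at hle ⊢; omega⟩
              · exact Or.inl ⟨t, by rw [if_neg hx]; exact hsome, by push_cast at hle ⊢; omega⟩
            · cases i with
              | zero =>
                  refine Or.inl ⟨s, ?_, by push_cast at hle ⊢; omega⟩
                  rw [if_pos (by simpa using htrig)]
              | succ m =>
                  exact Or.inr ⟨m, by omega, by simpa using htrig, by push_cast at hle ⊢; omega⟩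

lemma pvLoopB_iff (parts : List String) : pvLoopB parts = true ↔ pvSpec parts := by
  rw [pvLoopB, pvLoopB_fold, pvSpecFrom_iff parts 0 none (by simp)]
  constructor
  · rintro (h | ⟨j, hj, hto, hrest⟩)
    · cases h
    · rcases hrest with ⟨t, ht, -⟩ | ⟨i, hi, htrig, hle⟩
      · cases ht
      · exact ⟨j, hj, hto, i, hi, htrig, hle⟩
  · rintro ⟨j, hj, hto, i, hi, htrig, hle⟩
    exact Or.inr ⟨j, hj, hto, Or.inr ⟨i, hi, htrig, hle⟩⟩

lemma pvLoopA_eq_pvLoopB (parts : List String) : pvLoopA parts = pvLoopB parts := by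
  rw [Bool.eq_iff_iff, pvLoopA_iff, pvLoopB_iff]

-- ===== VERDICT (by name: the statement is the Claim_ definition above) =====
theorem simulate_update_detection_spec : Claim_equal_simulate_update_detection := by
  intro user_message _
  unfold Spec_simulate_update_detection
  simp only [simulate_update_detection, simulate_update_detection_alt, pvLoopA_eq_pvLoopB]
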